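-- pv_equiv track=rewrite | github.com/Udaydsmls/Three_Player_Hexagonal_Othello | test1.py | generate_generalized_matrix
-- ===== SOURCE A (Python) =====
-- def generate_generalized_matrix(n, h, m0):
--     """
--     Generate a matrix with a varying alternating block pattern.
--
--     Parameters:
--       n  : Number of 1's in the alternating block of the first row
--            (the block length in the first row will be 2*n - 1, giving n ones)
--       h  : Total number of rows in the matrix
--       m0 : Left/right padding (number of zeros) in the first row
--
--     Returns:
--       A 2D list (matrix) where each element is an integer (0 or 1)
--     """
--     # Total width is fixed for all rows:
--     width = (2 * n - 1) + 2 * m0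
--     matrix = []  # This will store the final 2D array
--
--     for i in range(h):
--         # Compute a delta for vertical symmetry (distance from top or bottom)
--         delta = min(i, h - 1 - i)
--         # Adjust margin for the current row (ensuring it doesn't become negative)
--         margin = max(m0 - delta, 0)
--         # The alternating block length is what remains after subtracting margins
--         block_len = width - 2 * margin
--         # Create the alternating block starting with 1 (i.e., positions 0,2,4,... are 1's)
--         block = [1 if j % 2 == 0 else 0 for j in range(block_len)]
--         # Build the full row: left margin zeros + block + right margin zeros
--         row = [0] * margin + block + [0] * margin
--         matrix.append(row)
--
--     return matrix
-- ===== SOURCE B (Python) =====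
-- def generate_generalized_matrix(n, h, m0):
--     # Compute only the top half of the rows; mirror the rest (fresh copies),
--     # since delta = min(i, h-1-i) makes the matrix vertically symmetric.
--     width = (2 * n - 1) + 2 * m0
--     half = (h + 1) // 2
--     top = []
--     for i in range(half):
--         margin = max(m0 - i, 0)
--         block_len = width - 2 * margin
--         row = [0] * margin + [1 - j % 2 for j in range(block_len)] + [0] * margin
--         top.append(row)
--     bottom = [list(top[h - 1 - i]) for i in range(half, h)]
--     return top + bottom
-- ===== Notes on version B (the rewrite author's own statement) =====
-- stated objective: alternative
-- what changed: B builds only the top ceil(h/2) rows with the margin/parity logic and produces the bottom rows by mirroring copies of already-built rows, exploiting the vertical symmetry delta = min(i, h-1-i).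
import Mathlib
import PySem

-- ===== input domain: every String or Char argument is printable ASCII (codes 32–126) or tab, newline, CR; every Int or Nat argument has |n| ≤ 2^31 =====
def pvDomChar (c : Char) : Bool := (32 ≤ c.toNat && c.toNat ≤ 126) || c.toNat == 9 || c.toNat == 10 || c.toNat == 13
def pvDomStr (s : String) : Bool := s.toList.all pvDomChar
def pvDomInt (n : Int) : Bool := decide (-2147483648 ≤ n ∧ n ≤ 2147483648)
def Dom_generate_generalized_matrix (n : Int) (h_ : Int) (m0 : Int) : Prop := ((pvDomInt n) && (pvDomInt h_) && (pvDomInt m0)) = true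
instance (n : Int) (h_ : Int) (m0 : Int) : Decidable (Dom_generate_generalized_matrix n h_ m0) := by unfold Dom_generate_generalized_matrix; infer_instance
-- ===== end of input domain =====

-- B builds only the top ceil(h/2) rows and mirrors copies of them for the bottom half
-- (vertical symmetry of delta = min(i, h-1-i)); same cost class, different decomposition.

-- ===== PORT A =====
-- one loop-body row of A
def pvRowA (n : Int) (h_ : Int) (m0 : Int) (i : Int) : List Int :=
  let width := (2 * n - 1) + 2 * m0
  let delta := min i (h_ - 1 - i)
  let margin := max (m0 - delta) 0
  let block_len := width - 2 * margin
  let block := (PySem.List.pyRange 0 block_len 1).map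
    (fun j => if PySem.Int.mod j 2 == 0 then (1 : Int) else 0)
  List.replicate margin.toNat 0 ++ block ++ List.replicate margin.toNat 0

def generate_generalized_matrix (n : Int) (h_ : Int) (m0 : Int) : List (List Int) :=
  (PySem.List.pyRange 0 h_ 1).foldl (fun matrix i => matrix ++ [pvRowA n h_ m0 i]) []

-- ===== PORT B =====
-- one top-half row of B (delta is just i there)
def pvRowB (n : Int) (m0 : Int) (i : Int) : List Int :=
  let width := (2 * n - 1) + 2 * m0
  let margin := max (m0 - i) 0
  let block_len := width - 2 * margin
  List.replicate margin.toNat 0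
    ++ (PySem.List.pyRange 0 block_len 1).map (fun j => 1 - PySem.Int.mod j 2)
    ++ List.replicate margin.toNat 0

def generate_generalized_matrix_alt (n : Int) (h_ : Int) (m0 : Int) : List (List Int) :=
  let half := PySem.Int.floordiv (h_ + 1) 2
  let top := (PySem.List.pyRange 0 half 1).foldl (fun t i => t ++ [pvRowB n m0 i]) []
  let bottom := (PySem.List.pyRange half h_ 1).map
    (fun i => PySem.List.pyGetD top (h_ - 1 - i) [])
  top ++ bottom

-- ===== PRECONDITION & SPEC =====
def Spec_generate_generalized_matrix (n : Int) (h_ : Int) (m0 : Int) (out : List (List Int)) : Prop := out = generate_generalized_matrix_alt n h_ m0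
instance (n : Int) (h_ : Int) (m0 : Int) (out : List (List Int)) : Decidable (Spec_generate_generalized_matrix n h_ m0 out) := by unfold Spec_generate_generalized_matrix; infer_instance

-- ===== CLAIM (what is proved, stated in full; the proofs are below) =====
def Claim_equal_generate_generalized_matrix : Prop := ∀ (n : Int) (h_ : Int) (m0 : Int), Dom_generate_generalized_matrix n h_ m0 → Spec_generate_generalized_matrix n h_ m0 (generate_generalized_matrix n h_ m0)

-- ===== LEMMAS AND PROOFS =====

-- A's row equals B's row at the reflected-to-top index min i (h-1-i).
theorem pvRowA_eq_rowB (n h_ m0 i : Int) :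
    pvRowA n h_ m0 i = pvRowB n m0 (min i (h_ - 1 - i)) := by
  simp only [pvRowA, pvRowB]
  congr 1
  congr 1
  apply List.map_congr_left
  intro j hj
  have hj0 : 0 ≤ j := (PySem.List.mem_pyRange_one.mp hj).1
  have hm : PySem.Int.mod j 2 = j % 2 := PySem.Int.mod_eq_emod_of_pos (by omega)
  rw [hm]
  have : j % 2 = 0 ∨ j % 2 = 1 := by omega
  rcases this with h0 | h1
  · simp [h0]
  · simp [h1]

theorem pv_main (n h_ m0 : Int) :
    generate_generalized_matrix n h_ m0 = generate_generalized_matrix_alt n h_ m0 := by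
  simp only [generate_generalized_matrix, generate_generalized_matrix_alt]
  rw [PySem.List.foldl_append_singleton_eq_map, PySem.List.foldl_append_singleton_eq_map]
  simp only [List.nil_append]
  have hhalf : PySem.Int.floordiv (h_ + 1) 2 = (h_ + 1) / 2 :=
    PySem.Int.floordiv_eq_ediv_of_pos (by omega)
  set half := PySem.Int.floordiv (h_ + 1) 2 with hh
  by_cases hpos : 0 < h_
  · have h0 : (0 : Int) ≤ half := by omega
    have h1 : half ≤ h_ := by omega
    rw [PySem.List.pyRange_one_append 0 half h_ h0 h1, List.map_append]
    congr 1
    · -- top half: rowA = rowB pointwise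
      apply List.map_congr_left
      intro i hi
      obtain ⟨hi0, hi1⟩ := PySem.List.mem_pyRange_one.mp hi
      rw [pvRowA_eq_rowB]
      congr 1
      omega
    · -- bottom half: each row is the mirrored top row
      apply List.map_congr_left
      intro i hi
      obtain ⟨hi0, hi1⟩ := PySem.List.mem_pyRange_one.mp hi
      have ht0 : (0 : Int) ≤ h_ - 1 - i := by omega
      have ht1 : h_ - 1 - i < half := by omega
      rw [PySem.List.pyGetD_map_pyRange_of_nonneg _ half _ _ ht0 ht1]
      rw [pvRowA_eq_rowB]
      congr 1
      omega
  · -- h ≤ 0: everything is empty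
    have e1 : PySem.List.pyRange 0 h_ 1 = [] := PySem.List.pyRange_one_eq_nil (by omega)
    have e2 : PySem.List.pyRange 0 half 1 = [] := PySem.List.pyRange_one_eq_nil (by omega)
    have e3 : PySem.List.pyRange half h_ 1 = [] := PySem.List.pyRange_one_eq_nil (by omega)
    simp [e1, e2, e3]

-- ===== VERDICT (by name: the statement is the Claim_ definition above) =====
theorem generate_generalized_matrix_spec : Claim_equal_generate_generalized_matrix := by
  intro n h_ m0 _
  unfold Spec_generate_generalized_matrix
  exact pv_main n h_ m0
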